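-- pv_equiv track=rewrite | github.com/ges0531/TIL | Algorithm/Coding_test/프로그래머스_200523/3의 거듭제곱.py | solution
-- ===== SOURCE A (Python) =====
-- import itertools
--
-- def solution(n):
--     three_list = []
--     sum_list = []
--     k = 0
--     while len(sum_list) < n:
--         if 3**k not in three_list:
--             three_list.append(3**k)
--         else:
--             for i in range(len(three_list)):
--                 for j in itertools.combinations(three_list, i):
--                     if sum(j) not in sum_list:
--                         sum_list.append(sum(j))
--             k += 1
--     sum_list.sort()
--     return sum_list[n]
-- ===== SOURCE B (Python) =====
-- def solution(n):
--     # n-th (0-indexed) number whose base-3 digits are all 0 or 1: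
--     # read n's binary digits and reinterpret them in base 3.
--     r, p = 0, 1
--     while n > 0:
--         if n % 2:
--             r += p
--         n //= 2
--         p *= 3
--     return r
-- ===== Notes on version B (the rewrite author's own statement) =====
-- stated objective: faster
-- what changed: A enumerates all subset sums of powers of 3 via itertools.combinations until enough are collected, then sorts and indexes; B reads n's binary digits and reinterprets them as base-3 digits, a closed-form O(log n) computation with no enumeration, no sort and no lists.
-- outside the precondition, e.g. on solution(1): A raises IndexError, B returns 1; on solution(3): A raises IndexError, B returns 4
import Mathlib
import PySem

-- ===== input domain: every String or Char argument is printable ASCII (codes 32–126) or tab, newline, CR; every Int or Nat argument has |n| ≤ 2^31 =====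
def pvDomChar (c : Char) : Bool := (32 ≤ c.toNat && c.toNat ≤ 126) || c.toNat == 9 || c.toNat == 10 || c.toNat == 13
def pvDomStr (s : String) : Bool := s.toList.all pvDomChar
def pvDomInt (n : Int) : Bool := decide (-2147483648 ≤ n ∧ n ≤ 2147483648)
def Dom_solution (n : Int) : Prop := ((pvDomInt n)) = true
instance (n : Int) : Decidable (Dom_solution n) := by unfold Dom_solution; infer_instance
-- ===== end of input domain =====

-- B replaces A's exponential subset-sum enumeration (itertools.combinations + sort + index)
-- by the closed form "read n's binary digits as base-3 digits", an O(log n) loop.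


-- ===== PORT A =====
-- the inner double 'for' of A: for i in range(len(three)): for j in combinations(three, i):
--   if sum(j) not in sum_list: sum_list.append(sum(j))
def innerFillA (three sums : List Int) : List Int :=
  (List.range three.length).foldl
    (fun acc i =>
      (PySem.List.combinations three i).foldl
        (fun acc2 j => if j.sum ∈ acc2 then acc2 else acc2 ++ [j.sum]) acc)
    sums

-- A's 'while len(sum_list) < n' loop; fuel is only a totality guard (2*n+4 steps always suffice)
def loopA : Nat → List Int → List Int → Nat → Int → List Int
  | 0, _, sums, _, _ => sums
  | fuel + 1, three, sums, k, n =>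
    if ((sums.length : Int)) < n then
      if (3 : Int) ^ k ∉ three then loopA fuel (three ++ [(3 : Int) ^ k]) sums k n
      else loopA fuel three (innerFillA three sums) (k + 1) n
    else sums

def solution (n : Int) : Int :=
  let sums := loopA (2 * n.toNat + 4) [] [] 0 n
  (PySem.List.pyGet? (PySem.List.sorted sums (fun x => x) false) n).getD 0

-- ===== PORT B =====
-- B's 'while n > 0' loop; fuel is only a totality guard (n.toNat+1 steps always suffice)
def altGo : Nat → Int → Int → Int → Int
  | 0, _, r, _ => r
  | fuel + 1, n, r, p =>
    if 0 < n then
      altGo fuel (PySem.Int.floordiv n 2) (if PySem.Int.mod n 2 ≠ 0 then r + p else r) (p * 3)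
    else r

def solution_alt (n : Int) : Int := altGo (n.toNat + 1) n 0 1

-- ===== PRECONDITION & SPEC =====
-- A raises IndexError exactly when n < 1 or n+1 is a power of two (its loop stops having
-- collected exactly n sums, so sum_list[n] is out of range); those inputs are excluded.
def Pre_solution (n : Int) : Prop := 1 ≤ n ∧ ∀ m : Nat, m ≤ 32 → n + 1 ≠ 2 ^ m
instance (n : Int) : Decidable (Pre_solution n) := by unfold Pre_solution; infer_instance
def pvWitness_solution : Int := 2

def Spec_solution (n : Int) (out : Int) : Prop := out = solution_alt n
instance (n : Int) (out : Int) : Decidable (Spec_solution n out) := by unfold Spec_solution; infer_instance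

-- ===== CLAIM (what is proved, stated in full; the proofs are below) =====
def Claim_equal_solution : Prop := ∀ (n : Int), Dom_solution n → Pre_solution n → Spec_solution n (solution n)
-- ===== LEMMAS AND PROOFS =====

-- g i = the number whose base-3 digits are the binary digits of i (what B computes)
def g : Nat → Int
  | 0 => 0
  | i + 1 => (((i + 1) % 2 : Nat) : Int) + 3 * g ((i + 1) / 2)
decreasing_by omega

lemma g_eq (i : Nat) : g i = ((i % 2 : Nat) : Int) + 3 * g (i / 2) := by
  cases i with
  | zero => simp [g]
  | succ j => rw [g]

lemma g_strictMono : ∀ {i j : Nat}, i < j → g i < g j := by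
  intro i j h
  induction j using Nat.strong_induction_on generalizing i with
  | _ j ih =>
    rw [g_eq i, g_eq j]
    rcases Nat.lt_or_ge (i / 2) (j / 2) with h2 | h2
    · have := ih (j / 2) (by omega) h2
      have hi : ((i % 2 : Nat) : Int) ≤ 1 := by omega
      have hj : (0 : Int) ≤ ((j % 2 : Nat) : Int) := by positivity
      omega
    · have heq : i / 2 = j / 2 := by omega
      have : i % 2 < j % 2 := by omega
      rw [heq]
      omega

lemma g_inj {i j : Nat} (h : g i = g j) : i = j := by
  rcases Nat.lt_trichotomy i j with h' | h' | h'
  · exact absurd h (ne_of_lt (g_strictMono h'))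
  · exact h'
  · exact absurd h.symm (ne_of_lt (g_strictMono h'))

lemma g_two_mul (i : Nat) : g (2 * i) = 3 * g i := by
  rw [g_eq (2 * i)]; simp [Nat.mul_mod_right]
lemma g_two_mul_add_one (i : Nat) : g (2 * i + 1) = 1 + 3 * g i := by
  rw [g_eq (2 * i + 1)]
  have h1 : (2 * i + 1) % 2 = 1 := by omega
  have h2 : (2 * i + 1) / 2 = i := by omega
  rw [h1, h2]; simp

-- the list of powers A has built after stage m: three_list = [3^0, …, 3^(m-1)]
def Tl (m : Nat) : List Int := (List.range m).map (fun j => (3 : Int) ^ j)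

lemma Tl_length (m : Nat) : (Tl m).length = m := by simp [Tl]

lemma Tl_succ_left (m : Nat) : Tl (m + 1) = 1 :: (Tl m).map (fun x => 3 * x) := by
  unfold Tl
  rw [List.range_succ_eq_map]
  simp [List.map_map, Function.comp_def, pow_succ, mul_comm]

lemma Tl_succ_right (m : Nat) : Tl (m + 1) = Tl m ++ [(3 : Int) ^ m] := by
  unfold Tl; rw [List.range_succ]; simp

lemma Tl_pos {m : Nat} {x : Int} (hx : x ∈ Tl m) : 0 < x := by
  simp only [Tl, List.mem_map, List.mem_range] at hx
  obtain ⟨j, _, rfl⟩ := hx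
  positivity

lemma sum_map_three (l : List Int) : (l.map (fun x => 3 * x)).sum = 3 * l.sum := by
  induction l with
  | nil => simp
  | cons a t ih => simp [ih]; ring

lemma Tl_sum (m : Nat) : (Tl m).sum = g (2 ^ m - 1) := by
  induction m with
  | zero => simp [Tl, g]
  | succ m ih =>
    rw [Tl_succ_left]
    have h1 : 2 ^ (m + 1) - 1 = 2 * (2 ^ m - 1) + 1 := by
      have := Nat.one_le_two_pow (n := m); omega
    rw [h1, g_two_mul_add_one, ← ih]
    simp [sum_map_three]

lemma pow_not_mem_Tl (m : Nat) : (3 : Int) ^ m ∉ Tl m := by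
  simp only [Tl, List.mem_map, List.mem_range]
  rintro ⟨j, hj, heq⟩
  have : (3 : Int) ^ j < 3 ^ m := by
    apply pow_lt_pow_right₀ (by norm_num) hj
  omega

-- subset sums of Tl m are exactly {g i : i < 2^m}
lemma sublist_sum_iff (m : Nat) (x : Int) :
    (∃ c : List Int, c.Sublist (Tl m) ∧ x = c.sum) ↔ ∃ i : Nat, i < 2 ^ m ∧ x = g i := by
  induction m generalizing x with
  | zero =>
    constructor
    · rintro ⟨c, hc, rfl⟩
      simp [Tl] at hc; subst hc
      exact ⟨0, by norm_num, by simp [g]⟩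
    · rintro ⟨i, hi, rfl⟩
      interval_cases i
      exact ⟨[], by simp [Tl], by simp [g]⟩
  | succ m ih =>
    rw [Tl_succ_left]
    constructor
    · rintro ⟨c, hc, rfl⟩
      rcases List.sublist_cons_iff.mp hc with h | ⟨r, rfl, hr⟩
      · obtain ⟨c', hc', rfl⟩ := List.sublist_map_iff.mp h
        obtain ⟨i, hi, hsum⟩ := (ih _).mp ⟨c', hc', rfl⟩
        refine ⟨2 * i, by omega, ?_⟩
        rw [g_two_mul, ← hsum, sum_map_three]
      · obtain ⟨c', hc', rfl⟩ := List.sublist_map_iff.mp hr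
        obtain ⟨i, hi, hsum⟩ := (ih _).mp ⟨c', hc', rfl⟩
        refine ⟨2 * i + 1, by omega, ?_⟩
        rw [g_two_mul_add_one, ← hsum]
        simp [sum_map_three]
    · rintro ⟨i, hi, rfl⟩
      obtain ⟨c', hc', hsum⟩ := (ih (g (i / 2))).mpr ⟨i / 2, by omega, rfl⟩
      rcases Nat.even_or_odd i with ⟨j, hj⟩ | ⟨j, hj⟩
      · refine ⟨c'.map (fun x => 3 * x), (hc'.map _).trans (List.sublist_cons_self _ _), ?_⟩
        have : i = 2 * (i / 2) := by omega
        rw [this, g_two_mul, hsum]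
        rw [sum_map_three]
      · refine ⟨1 :: c'.map (fun x => 3 * x), List.cons_sublist_cons.mpr (hc'.map _), ?_⟩
        have : i = 2 * (i / 2) + 1 := by omega
        rw [this, g_two_mul_add_one, hsum]
        simp [sum_map_three]

lemma sum_lt_of_proper : ∀ {l c : List Int}, c.Sublist l → (∀ x ∈ l, 0 < x) →
    c.length < l.length → c.sum < l.sum := by
  intro l c h
  induction h with
  | slnil => intro _ h; simp at h
  | @cons l₁ l₂ a h ih =>
    intro hpos _
    have h1 : l₁.sum ≤ l₂.sum :=
      h.sum_le_sum (fun x hx => le_of_lt (hpos x (List.mem_cons_of_mem _ hx)))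
    have h2 : 0 < a := hpos a (List.mem_cons_self)
    simp only [List.sum_cons]; omega
  | @cons₂ l₁ l₂ a h ih =>
    intro hpos hlen
    have := ih (fun x hx => hpos x (List.mem_cons_of_mem _ hx)) (by simpa using hlen)
    simp only [List.sum_cons]; omega

-- the values A's inner fill ranges over at stage m
def CC (m : Nat) : List Int :=
  (List.range m).flatMap (fun i => (PySem.List.combinations (Tl m) i).map List.sum)

lemma mem_CC_iff (m : Nat) (x : Int) : x ∈ CC m ↔ ∃ i : Nat, i < 2 ^ m - 1 ∧ x = g i := by
  have hTs : (Tl m).sum = g (2 ^ m - 1) := Tl_sum m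
  have h2p : 1 ≤ 2 ^ m := Nat.one_le_two_pow
  constructor
  · intro hx
    simp only [CC, List.mem_flatMap, List.mem_map, List.mem_range] at hx
    obtain ⟨i, hi, c, hc, rfl⟩ := hx
    obtain ⟨hsub, hlen⟩ := (PySem.List.mem_combinations_iff _ _ _).mp hc
    obtain ⟨j, hj, hsum⟩ := (sublist_sum_iff m c.sum).mp ⟨c, hsub, rfl⟩
    refine ⟨j, ?_, hsum⟩
    have hlt : c.sum < (Tl m).sum := by
      apply sum_lt_of_proper hsub (fun x hx => Tl_pos hx)
      rw [Tl_length]; omega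
    by_contra hge
    have hj' : j = 2 ^ m - 1 := by omega
    rw [hTs, ← hj', ← hsum] at hlt
    omega
  · rintro ⟨i, hi, rfl⟩
    obtain ⟨c, hc, hsum⟩ := (sublist_sum_iff m (g i)).mpr ⟨i, by omega, rfl⟩
    have hclen : c.length < m := by
      rcases Nat.lt_or_ge c.length m with h | h
      · exact h
      · exfalso
        have hlen : c.length = (Tl m).length := by
          have h2 := hc.length_le
          rw [Tl_length] at h2 ⊢
          omega
        have hceq : c = Tl m := hc.eq_of_length hlen
        subst hceq
        rw [hTs] at hsum
        have : i = 2 ^ m - 1 := g_inj hsum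
        omega
    simp only [CC, List.mem_flatMap, List.mem_map, List.mem_range]
    exact ⟨c.length, hclen, c, (PySem.List.mem_combinations_iff _ _ _).mpr ⟨hc, rfl⟩, hsum.symm⟩

-- A's sum_list after stage m
def SSt : Nat → List Int
  | 0 => []
  | m + 1 => PySem.Set.update (SSt m) (CC (m + 1))

lemma update_nodup {s : List Int} (l : List Int) (hs : s.Nodup) :
    (PySem.Set.update s l).Nodup := by
  induction l generalizing s with
  | nil => exact hs
  | cons x t ih => exact ih (PySem.Set.nodup_add s x hs)

lemma mem_update {s : List Int} (l : List Int) (x : Int) :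
    x ∈ PySem.Set.update s l ↔ x ∈ s ∨ x ∈ l := by
  induction l generalizing s with
  | nil => simp [PySem.Set.update]
  | cons y t ih =>
    show x ∈ PySem.Set.update (PySem.Set.add s y) t ↔ _
    rw [ih, PySem.Set.mem_add]
    simp only [List.mem_cons]
    tauto

lemma SSt_nodup (m : Nat) : (SSt m).Nodup := by
  induction m with
  | zero => simp [SSt]
  | succ m ih => exact update_nodup _ ih

lemma mem_SSt_iff (m : Nat) (x : Int) : x ∈ SSt m ↔ ∃ i : Nat, i < 2 ^ m - 1 ∧ x = g i := by
  induction m with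
  | zero => simp [SSt]
  | succ m ih =>
    show x ∈ PySem.Set.update (SSt m) (CC (m + 1)) ↔ _
    rw [mem_update, ih, mem_CC_iff]
    have hle : 2 ^ m ≤ 2 ^ (m + 1) := Nat.pow_le_pow_right (by norm_num) (by omega)
    constructor
    · rintro (⟨i, hi, rfl⟩ | ⟨i, hi, rfl⟩) <;> clear ih
      · exact ⟨i, by omega, rfl⟩
      · exact ⟨i, by omega, rfl⟩
    · rintro ⟨i, hi, rfl⟩
      exact Or.inr ⟨i, hi, rfl⟩

lemma foldl_flatMap {α β γ : Type} (l : List α) (f : α → List β) (gf : γ → β → γ) (init : γ) :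
    (l.flatMap f).foldl gf init = l.foldl (fun a x => (f x).foldl gf a) init := by
  induction l generalizing init with
  | nil => rfl
  | cons x t ih => simp [List.flatMap_cons, List.foldl_append, ih]

lemma innerFillA_eq (m : Nat) (sums : List Int) :
    innerFillA (Tl m) sums = PySem.Set.update sums (CC m) := by
  unfold innerFillA CC PySem.Set.update
  rw [foldl_flatMap, Tl_length]
  apply PySem.List.foldl_congr_mem
  intro a i _
  rw [List.foldl_map]
  apply PySem.List.foldl_congr_mem
  intro acc c _
  simp [PySem.Set.add]

lemma g_injective : Function.Injective g := fun _ _ h => g_inj h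

lemma SSt_perm (m : Nat) : (SSt m).Perm ((List.range (2 ^ m - 1)).map g) := by
  apply List.perm_of_nodup_nodup_toFinset_eq (SSt_nodup m)
    (List.nodup_range.map g_injective)
  ext x
  simp only [List.mem_toFinset, mem_SSt_iff, List.mem_map, List.mem_range]
  constructor
  · rintro ⟨i, hi, rfl⟩; exact ⟨i, hi, rfl⟩
  · rintro ⟨i, hi, rfl⟩; exact ⟨i, hi, rfl⟩

lemma SSt_length (m : Nat) : (SSt m).length = 2 ^ m - 1 := by
  rw [(SSt_perm m).length_eq]
  simp

lemma SSt_length_int (m : Nat) : ((SSt m).length : Int) = (2 ^ m : Int) - 1 := by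
  rw [SSt_length, Nat.cast_sub Nat.one_le_two_pow]
  push_cast
  ring

-- sorted characterisation of the final sum_list
lemma sorted_SSt (m : Nat) :
    PySem.List.sorted (SSt m) (fun x => x) false = (List.range (2 ^ m - 1)).map g := by
  apply PySem.List.sorted_eq_of_perm_of_pairwise_lt
  · exact (SSt_perm m).symm
  · exact List.pairwise_map.mpr ((List.pairwise_lt_range).imp (fun h => g_strictMono h))

lemma loopA_exit (fuel : Nat) (three sums : List Int) (k : Nat) (n : Int)
    (h : ¬ ((sums.length : Int) < n)) : loopA fuel three sums k n = sums := by
  cases fuel with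
  | zero => rfl
  | succ f => simp [loopA, h]

lemma loopA_step (fuel m : Nat) (n : Int) (h : ((SSt m).length : Int) < n) :
    loopA (fuel + 2) (Tl m) (SSt m) m n = loopA fuel (Tl (m + 1)) (SSt (m + 1)) (m + 1) n := by
  have h1 : (3 : Int) ^ m ∉ Tl m := pow_not_mem_Tl m
  have h2 : (3 : Int) ^ m ∈ Tl (m + 1) := by
    rw [Tl_succ_right]; simp
  show loopA (fuel + 1 + 1) _ _ _ _ = _
  rw [loopA]
  simp only [h, if_true, h1, not_false_iff, if_true]
  rw [← Tl_succ_right, loopA]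
  simp only [h, if_true, h2, not_true, if_false]
  rw [innerFillA_eq]
  rfl

lemma loopA_run (j : Nat) : ∀ (m fuel : Nat) (n : Int), 2 * j ≤ fuel →
    ((2 ^ m : Int)) - 1 < n → n ≤ (2 ^ (m + j) : Int) - 1 →
    ∃ t : Nat, loopA fuel (Tl m) (SSt m) m n = SSt t ∧
      n ≤ (2 ^ t : Int) - 1 ∧ ((2 ^ (t - 1) : Int)) - 1 < n ∧ 1 ≤ t := by
  induction j with
  | zero => intro m fuel n _ h1 h2; simp only [Nat.add_zero] at h2; omega
  | succ j ih =>
    intro m fuel n hfuel h1 h2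
    obtain ⟨f, rfl⟩ : ∃ f, fuel = f + 2 := ⟨fuel - 2, by omega⟩
    have hlen : ((SSt m).length : Int) < n := by
      rw [SSt_length_int]; omega
    rw [loopA_step f m n hlen]
    rcases le_or_gt n ((2 ^ (m + 1) : Int) - 1) with hle | hgt
    · refine ⟨m + 1, ?_, hle, by simpa using h1, by omega⟩
      apply loopA_exit
      rw [SSt_length_int]; omega
    · obtain ⟨t, ht⟩ := ih (m + 1) f n (by omega) hgt
        (by rw [show m + 1 + j = m + (j + 1) by omega]; exact h2)
      exact ⟨t, ht⟩

lemma altGo_eq (k : Nat) : ∀ (fuel : Nat) (r p : Int), k + 1 ≤ fuel →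
    altGo fuel (k : Int) r p = r + p * g k := by
  induction k using Nat.strong_induction_on with
  | _ k ih =>
    intro fuel r p hfuel
    obtain ⟨f, rfl⟩ : ∃ f, fuel = f + 1 := ⟨fuel - 1, by omega⟩
    cases k with
    | zero => simp [altGo, g]
    | succ j =>
      rw [altGo]
      have hpos : (0 : Int) < ((j + 1 : Nat) : Int) := by positivity
      rw [if_pos hpos]
      have hd : PySem.Int.floordiv ((j + 1 : Nat) : Int) 2 = (((j + 1) / 2 : Nat) : Int) := by
        exact_mod_cast PySem.Int.floordiv_natCast (j + 1) 2
      have hm : PySem.Int.mod ((j + 1 : Nat) : Int) 2 = (((j + 1) % 2 : Nat) : Int) := by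
        exact_mod_cast PySem.Int.mod_natCast (j + 1) 2
      rw [hd, hm]
      rw [ih ((j + 1) / 2) (by omega) f _ _ (by omega)]
      rw [g_eq (j + 1)]
      rcases Nat.even_or_odd (j + 1) with ⟨i, hi⟩ | ⟨i, hi⟩
      · have h2 : (j + 1) % 2 = 0 := by omega
        rw [h2]; simp; ring
      · have h2 : (j + 1) % 2 = 1 := by omega
        rw [h2]; simp; ring

-- ===== VERDICT (by name: the statement is the Claim_ definition above) =====
theorem solution_spec : Claim_equal_solution := by
  intro n hdom hpre
  obtain ⟨hn1, hpow⟩ := hpre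
  unfold Spec_solution
  have hdom' : n ≤ 2147483648 := by
    unfold Dom_solution pvDomInt at hdom
    simp only [decide_eq_true_eq] at hdom
    exact hdom.2
  have hn0 : 0 ≤ n := by omega
  have hstart1 : ((2 ^ 0 : Int)) - 1 < n := by norm_num; omega
  have hn2 : n ≤ (2 ^ (0 + n.toNat) : Int) - 1 := by
    have h := Nat.lt_two_pow_self (n := n.toNat)
    have h2 : ((2 ^ n.toNat : Nat) : Int) = (2 : Int) ^ n.toNat := by push_cast; ring
    simp only [Nat.zero_add]
    omega
  obtain ⟨t, heq, hle, hgt, ht1⟩ :=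
    loopA_run n.toNat 0 (2 * n.toNat + 4) n (by omega) hstart1 hn2
  rw [show Tl 0 = [] from rfl, show SSt 0 = [] from rfl] at heq
  have ht32 : t ≤ 32 := by
    by_contra hgt32
    have h1 : (32 : Nat) ≤ t - 1 := by omega
    have h2 : (2 : Int) ^ 32 ≤ 2 ^ (t - 1) := pow_le_pow_right₀ (by norm_num) h1
    have h3 : (2 : Int) ^ 32 = 4294967296 := by norm_num
    omega
  have hne : n ≠ (2 ^ t : Int) - 1 := by
    intro h
    exact hpow t ht32 (by omega)
  have hlt : n < (2 ^ t : Int) - 1 := lt_of_le_of_ne hle hne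
  have hcast : ((2 ^ t - 1 : Nat) : Int) = (2 ^ t : Int) - 1 := by
    rw [Nat.cast_sub Nat.one_le_two_pow]
    push_cast
    ring
  have hNat : n.toNat < 2 ^ t - 1 := by omega
  show solution n = solution_alt n
  unfold solution
  rw [heq]
  show (PySem.List.pyGet? (PySem.List.sorted (SSt t) (fun x => x) false) n).getD 0 = solution_alt n
  rw [sorted_SSt]
  have hget : (PySem.List.pyGet? ((List.range (2 ^ t - 1)).map g) n).getD 0
      = ((List.range (2 ^ t - 1)).map g)[n.toNat]'(by simpa using hNat) := by
    show PySem.List.pyGetD _ n 0 = _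
    apply PySem.List.pyGetD_eq_getElem _ _ hn0
    simp only [List.length_map, List.length_range]
    omega
  rw [hget]
  have hlhs : ((List.range (2 ^ t - 1)).map g)[n.toNat]'(by simpa using hNat) = g n.toNat := by
    simp
  rw [hlhs]
  unfold solution_alt
  have hn' : ((n.toNat : Nat) : Int) = n := Int.toNat_of_nonneg hn0
  conv_rhs => rw [← hn']
  rw [Int.toNat_natCast, altGo_eq n.toNat (n.toNat + 1) 0 1 (le_refl _)]
  ring
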